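-- pv_equiv track=rewrite | github.com/Jacoba1100254352/PycharmProjects | Fun/CorrectedPathForShell.py | correctDownloadFilePath
-- ===== SOURCE A (Python) =====
-- def needsBackSlash(char):
--     needsBackSlashList = [' ', '(', ')', '\'']
--     return char in needsBackSlashList
--
-- def correctDownloadFilePath(downloadFilePath):
--     insertLocations = []
--
--     # Fix the ends of the file path
--     while downloadFilePath[0] == ' ':
--         downloadFilePath = downloadFilePath[1:]
--     if downloadFilePath[0] != '/':
--         downloadFilePath = '/' + downloadFilePath
--     if downloadFilePath[len(downloadFilePath) - 1] != '/':
--         downloadFilePath += '/'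
--
--     # Find the positions that need a '/'
--     for index in range(len(downloadFilePath)):
--         if needsBackSlash(downloadFilePath[index]) and downloadFilePath[index - 1] != '\\':
--             insertLocations.append(index + len(insertLocations))  # with each insert the new location shifts by +1
--     # Add the '/' to the correct locations
--     for index in insertLocations:
--         downloadFilePath = downloadFilePath[:index] + '\\' + downloadFilePath[index:]
--     return downloadFilePath
-- ===== SOURCE B (Python) =====
-- def correctDownloadFilePath(downloadFilePath):
--     path = downloadFilePath.lstrip(' ')
--     if path[0] != '/':
--         path = '/' + path
--     if path[-1] != '/':
--         path += '/'
--     special = {' ', '(', ')', "'"}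
--     out = []
--     prev = None
--     for ch in path:
--         if ch in special and prev != '\\':
--             out.append('\\')
--         out.append(ch)
--         prev = ch
--     return ''.join(out)
-- ===== Notes on version B (the rewrite author's own statement) =====
-- stated objective: faster
-- what changed: Replaced A's two-pass scheme (collect shifted insert indices, then repeatedly rebuild the string by slice-insertion) with one left-to-right pass that emits a backslash before each special character whose predecessor is not a backslash, joined once at the end.
import Mathlib
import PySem

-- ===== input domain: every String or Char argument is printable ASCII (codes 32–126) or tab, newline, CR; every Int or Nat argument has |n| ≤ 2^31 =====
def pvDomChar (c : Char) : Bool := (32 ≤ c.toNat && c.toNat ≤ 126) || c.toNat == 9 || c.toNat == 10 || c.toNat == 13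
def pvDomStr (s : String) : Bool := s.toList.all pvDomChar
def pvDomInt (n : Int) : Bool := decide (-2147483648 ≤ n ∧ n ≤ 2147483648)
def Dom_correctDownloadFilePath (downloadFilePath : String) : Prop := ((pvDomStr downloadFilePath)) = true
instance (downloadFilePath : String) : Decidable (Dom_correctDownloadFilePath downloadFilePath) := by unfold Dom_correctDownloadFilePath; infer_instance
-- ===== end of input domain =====

-- B replaces A's two-pass escaping (collect shifted insert indices, then repeatedly rebuild the
-- string by slice-insertion) with a single pass emitting each escape in place.

-- ===== PORT A =====

def pyNeedsBackSlash (c : Char) : Bool := [' ', '(', ')', '\''].contains c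

-- 'while downloadFilePath[0] == ' ': downloadFilePath = downloadFilePath[1:]' ;
-- none = the IndexError Python raises indexing the empty string (excluded by Pre_)
def pvStripLead : List Char → Option (List Char)
  | [] => none
  | c :: cs => if c = ' ' then pvStripLead cs else some (c :: cs)

-- loop body of 'for index in range(len(downloadFilePath))' (the scan collecting insert locations)
def pvStep (s : List Char) (acc : List Int) (i : Int) : List Int :=
  if ((PySem.List.pyGet? s i).elim false pyNeedsBackSlash
      && (PySem.List.pyGet? s (i - 1) != some '\\')) = true
  then acc ++ [i + (acc.length : Int)] else acc

-- loop body of 'for index in insertLocations' : s[:index] + '\\' + s[index:]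
def pvIns (t : List Char) (idx : Int) : List Char :=
  PySem.List.slice t none (some idx) ++ '\\' :: PySem.List.slice t (some idx) none

def correctDownloadFilePath (downloadFilePath : String) : String :=
  match pvStripLead downloadFilePath.toList with
  | none => ""      -- Python A raises IndexError here (excluded by Pre_)
  | some s0 =>
    let s1 := if PySem.List.pyGet? s0 0 ≠ some '/' then '/' :: s0 else s0
    let s2 := if PySem.List.pyGet? s1 ((s1.length : Int) - 1) ≠ some '/' then s1 ++ ['/'] else s1
    let insertLocations := (PySem.List.pyRange 0 (s2.length : Int) 1).foldl (pvStep s2) []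
    String.mk (insertLocations.foldl pvIns s2)

-- ===== PORT B =====

-- the single escaping pass: 'for ch in path: …' carrying prev
def pvEscPass : List Char → Option Char → List Char
  | [], _ => []
  | c :: cs, prev =>
    (if ([' ', '(', ')', '\''].contains c && (prev != some '\\')) = true
     then ['\\', c] else [c]) ++ pvEscPass cs (some c)

def correctDownloadFilePath_alt (downloadFilePath : String) : String :=
  let path := downloadFilePath.toList.dropWhile (· = ' ')   -- lstrip(' ')
  if path = [] then ""    -- Python B raises IndexError here (excluded by Pre_)
  else
    let p1 := if PySem.List.pyGet? path 0 ≠ some '/' then '/' :: path else path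
    let p2 := if PySem.List.pyGet? p1 (-1) ≠ some '/' then p1 ++ ['/'] else p1
    String.mk (pvEscPass p2 none)

-- ===== PRECONDITION & SPEC =====
-- Both Pythons raise IndexError when the input is empty or consists only of spaces; Pre_ excludes exactly those.
def Pre_correctDownloadFilePath (downloadFilePath : String) : Prop :=
  downloadFilePath.toList.dropWhile (· = ' ') ≠ []
instance (downloadFilePath : String) : Decidable (Pre_correctDownloadFilePath downloadFilePath) := by
  unfold Pre_correctDownloadFilePath; infer_instance

def pvWitness_correctDownloadFilePath : String := " my file (1).txt"

def Spec_correctDownloadFilePath (downloadFilePath : String) (out : String) : Prop := out = correctDownloadFilePath_alt downloadFilePath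
instance (downloadFilePath : String) (out : String) : Decidable (Spec_correctDownloadFilePath downloadFilePath out) := by unfold Spec_correctDownloadFilePath; infer_instance

-- ===== CLAIM (what is proved, stated in full; the proofs are below) =====
def Claim_equal_correctDownloadFilePath : Prop := ∀ (downloadFilePath : String), Dom_correctDownloadFilePath downloadFilePath → Pre_correctDownloadFilePath downloadFilePath → Spec_correctDownloadFilePath downloadFilePath (correctDownloadFilePath downloadFilePath)

-- ===== LEMMAS AND PROOFS =====

-- the flag of each position: special char whose predecessor is not a backslash
def pvFlags : List Char → Option Char → List Bool
  | [], _ => []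
  | c :: cs, prev => (pyNeedsBackSlash c && (prev != some '\\')) :: pvFlags cs (some c)

-- positions A appends: index i plus the number k of earlier inserts
def pvCollect : List Bool → Int → Int → List Int
  | [], _, _ => []
  | f :: fs, i, k => if f then (i + k) :: pvCollect fs (i+1) (k+1) else pvCollect fs (i+1) k

-- the interleaving both programs produce
def pvInter : List Bool → List Char → List Char
  | f :: fs, c :: cs => (if f then ['\\', c] else [c]) ++ pvInter fs cs
  | _, _ => []

theorem pvStripLead_eq_dropWhile (l : List Char) (h : l.dropWhile (· = ' ') ≠ []) :
    pvStripLead l = some (l.dropWhile (· = ' ')) := by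
  induction l with
  | nil => simp at h
  | cons c cs ih =>
    by_cases hc : c = ' '
    · simp only [pvStripLead, List.dropWhile, hc] at *
      simpa using ih (by simpa using h)
    · simp [pvStripLead, List.dropWhile, hc]

theorem pvFlags_length (l : List Char) (p : Option Char) : (pvFlags l p).length = l.length := by
  induction l generalizing p with
  | nil => rfl
  | cons c cs ih => simp [pvFlags, ih]

theorem pvInter_eq_escPass (l : List Char) (p : Option Char) :
    pvInter (pvFlags l p) l = pvEscPass l p := by
  induction l generalizing p with
  | nil => rfl
  | cons c cs ih => simp [pvFlags, pvInter, pvEscPass, pyNeedsBackSlash, ih]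

theorem pvGet_last (l : List Char) (h : l ≠ []) :
    PySem.List.pyGet? l ((l.length : Int) - 1) = l.getLast? := by
  have h0 : 0 < l.length := List.length_pos_of_ne_nil h
  have h1 : (l.length : Int) - 1 = ((l.length - 1 : Nat) : Int) := by omega
  rw [h1]
  simp [PySem.List.pyGet?_natCast, List.getLast?_eq_getElem?]

theorem pvLocsAux (v : List Char) : ∀ (u : List Char) (hu : u ≠ []) (acc : List Int),
    (PySem.List.pyRange (u.length : Int) ((u.length : Int) + (v.length : Int)) 1).foldl (pvStep (u ++ v)) acc
      = acc ++ pvCollect (pvFlags v (some (u.getLast hu))) (u.length : Int) (acc.length : Int) := by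
  induction v with
  | nil =>
    intro u hu acc
    simp [PySem.List.pyRange_one, pvFlags, pvCollect]
  | cons c cs ih =>
    intro u hu acc
    have hlt : (u.length : Int) < (u.length : Int) + ((c :: cs).length : Int) := by
      simp only [List.length_cons]; push_cast; omega
    rw [PySem.List.pyRange_one_cons hlt, List.foldl_cons]
    obtain ⟨u', x, hux⟩ := (List.eq_nil_or_concat u).resolve_left hu
    rw [List.concat_eq_append] at hux
    subst hux
    have hget : PySem.List.pyGet? ((u' ++ [x]) ++ (c :: cs)) (((u' ++ [x]).length : Int)) = some c :=
      PySem.List.pyGet?_append_length (u' ++ [x]) cs c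
    have hprev : PySem.List.pyGet? ((u' ++ [x]) ++ (c :: cs)) (((u' ++ [x]).length : Int) - 1) = some x := by
      have h1 : (((u' ++ [x]).length : Int)) - 1 = (u'.length : Int) := by
        push_cast; simp
      rw [h1]
      have h2 : (u' ++ [x]) ++ (c :: cs) = u' ++ (x :: (c :: cs)) := by simp
      rw [h2]
      exact PySem.List.pyGet?_append_length u' (c :: cs) x
    have hlast : (u' ++ [x]).getLast hu = x := List.getLast_append _
    rw [hlast]
    by_cases hf : (pyNeedsBackSlash c && (some x != some '\\')) = true
    · have hstep : pvStep ((u' ++ [x]) ++ (c :: cs)) acc (((u' ++ [x]).length : Int))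
          = acc ++ [(((u' ++ [x]).length : Int)) + (acc.length : Int)] := by
        simp only [pvStep, hget, hprev, Option.elim]
        rw [if_pos hf]
      rw [hstep]
      have happ : (u' ++ [x]) ++ (c :: cs) = ((u' ++ [x]) ++ [c]) ++ cs := by simp
      have hih := ih ((u' ++ [x]) ++ [c]) (by simp) (acc ++ [(((u' ++ [x]).length : Int)) + (acc.length : Int)])
      have hc1 : (((u' ++ [x]) ++ [c]).length : Int) = ((u' ++ [x]).length : Int) + 1 := by
        simp only [List.length_append, List.length_singleton]; push_cast; ring
      have hc2 : ((acc ++ [(((u' ++ [x]).length : Int)) + (acc.length : Int)]).length : Int) = (acc.length : Int) + 1 := by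
        push_cast; simp
      have hl2 : ((u' ++ [x]) ++ [c]).getLast (by simp) = c := List.getLast_append _
      rw [hc1, hc2, hl2] at hih
      have hr : ((u' ++ [x]).length : Int) + 1 + (cs.length : Int)
          = ((u' ++ [x]).length : Int) + ((c :: cs).length : Int) := by
        simp only [List.length_cons]; push_cast; ring
      rw [hr, ← happ] at hih
      rw [hih]
      simp only [pvFlags, pvCollect]
      rw [if_pos hf]
      simp
    · have hstep : pvStep ((u' ++ [x]) ++ (c :: cs)) acc (((u' ++ [x]).length : Int)) = acc := by
        simp only [pvStep, hget, hprev, Option.elim]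
        rw [if_neg hf]
      rw [hstep]
      have happ : (u' ++ [x]) ++ (c :: cs) = ((u' ++ [x]) ++ [c]) ++ cs := by simp
      have hih := ih ((u' ++ [x]) ++ [c]) (by simp) acc
      have hc1 : (((u' ++ [x]) ++ [c]).length : Int) = ((u' ++ [x]).length : Int) + 1 := by
        simp only [List.length_append, List.length_singleton]; push_cast; ring
      have hl2 : ((u' ++ [x]) ++ [c]).getLast (by simp) = c := List.getLast_append _
      rw [hc1, hl2] at hih
      have hr : ((u' ++ [x]).length : Int) + 1 + (cs.length : Int)
          = ((u' ++ [x]).length : Int) + ((c :: cs).length : Int) := by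
        simp only [List.length_cons]; push_cast; ring
      rw [hr, ← happ] at hih
      rw [hih]
      simp only [pvFlags, pvCollect]
      rw [if_neg (by simpa using hf)]

theorem pvLocsTop (t : List Char) :
    (PySem.List.pyRange 0 ((('/' :: t).length : Int)) 1).foldl (pvStep ('/' :: t)) []
      = pvCollect (pvFlags ('/' :: t) none) 0 0 := by
  have hlt : (0 : Int) < (('/' :: t).length : Int) := by
    simp only [List.length_cons]; push_cast; omega
  rw [PySem.List.pyRange_one_cons hlt, List.foldl_cons]
  have hstep0 : pvStep ('/' :: t) [] 0 = [] := by
    simp [pvStep, PySem.List.pyGet?_zero_cons, pyNeedsBackSlash]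
  rw [hstep0]
  have h := pvLocsAux t ['/'] (by simp) []
  simp only [List.length_singleton, Nat.cast_one, Nat.cast_zero, List.length_nil,
    List.singleton_append, List.getLast_singleton, List.nil_append] at h
  have e2 : ((('/' :: t).length : Nat) : Int) = 1 + (t.length : Int) := by
    simp only [List.length_cons]; push_cast; ring
  rw [show (0 : Int) + 1 = 1 by norm_num, e2, h]
  simp [pvFlags, pvCollect, pyNeedsBackSlash]

theorem pvInsAux (fs : List Bool) : ∀ (s pre : List Char) (i k : Nat),
    pre.length = i + k → fs.length = s.length →
    (pvCollect fs (i : Int) (k : Int)).foldl pvIns (pre ++ s) = pre ++ pvInter fs s := by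
  induction fs with
  | nil =>
    intro s pre i k hpre hlen
    have hs : s = [] := List.eq_nil_of_length_eq_zero (by simpa using hlen.symm)
    subst hs
    simp [pvCollect, pvInter]
  | cons f fs ih =>
    intro s pre i k hpre hlen
    cases s with
    | nil => simp at hlen
    | cons c cs =>
      simp only [pvCollect]
      by_cases hf : f = true
      · rw [if_pos hf, List.foldl_cons]
        have hidx : (i : Int) + (k : Int) = ((pre.length : Nat) : Int) := by rw [hpre]; push_cast; ring
        have hins : pvIns (pre ++ c :: cs) ((i : Int) + (k : Int)) = (pre ++ ['\\', c]) ++ cs := by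
          rw [hidx]
          simp [pvIns, PySem.List.slice_to_natCast, PySem.List.slice_from_natCast,
            List.take_left, List.drop_left]
        rw [hins]
        have hih := ih cs (pre ++ ['\\', c]) (i+1) (k+1) (by simp [hpre]; omega) (by simpa using hlen)
        have hc1 : ((i+1 : Nat) : Int) = (i : Int) + 1 := by push_cast; ring
        have hc2 : ((k+1 : Nat) : Int) = (k : Int) + 1 := by push_cast; ring
        rw [hc1, hc2] at hih
        rw [hih, hf]
        simp [pvInter]
      · rw [if_neg hf]
        have hih := ih cs (pre ++ [c]) (i+1) k (by simp [hpre]; omega) (by simpa using hlen)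
        have hc1 : ((i+1 : Nat) : Int) = (i : Int) + 1 := by push_cast; ring
        rw [hc1] at hih
        have happ : pre ++ c :: cs = (pre ++ [c]) ++ cs := by simp
        rw [happ, hih]
        have hff : f = false := by simpa using hf
        simp [hff, pvInter]

theorem pvMainList (t : List Char) :
    ((PySem.List.pyRange 0 ((('/' :: t).length : Int)) 1).foldl (pvStep ('/' :: t)) []).foldl pvIns ('/' :: t)
      = pvEscPass ('/' :: t) none := by
  rw [pvLocsTop t]
  have h := pvInsAux (pvFlags ('/' :: t) none) ('/' :: t) [] 0 0 (by simp) (pvFlags_length _ _)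
  simp only [List.nil_append, Nat.cast_zero] at h
  rw [h, pvInter_eq_escPass]

-- ===== VERDICT (by name: the statement is the Claim_ definition above) =====
theorem correctDownloadFilePath_spec : Claim_equal_correctDownloadFilePath := by
  intro s _hDom hPre
  unfold Pre_correctDownloadFilePath at hPre
  unfold Spec_correctDownloadFilePath correctDownloadFilePath correctDownloadFilePath_alt
  rw [pvStripLead_eq_dropWhile _ hPre]
  dsimp only
  rw [if_neg hPre]
  generalize hq : (if PySem.List.pyGet? (s.toList.dropWhile (· = ' ')) 0 ≠ some '/'
      then '/' :: (s.toList.dropWhile (· = ' ')) else (s.toList.dropWhile (· = ' '))) = q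
  have hqhead : ∃ t, q = '/' :: t := by
    rw [← hq]; split
    · exact ⟨_, rfl⟩
    · next hcond =>
      rw [not_not] at hcond
      obtain ⟨a, t, hat⟩ := List.exists_cons_of_ne_nil hPre
      rw [hat] at hcond ⊢
      rw [PySem.List.pyGet?_zero_cons] at hcond
      exact ⟨t, by rw [Option.some.inj hcond]⟩
  obtain ⟨t0, rfl⟩ := hqhead
  rw [pvGet_last ('/' :: t0) (by simp), PySem.List.pyGet?_neg_one]
  generalize hr : (if ('/' :: t0).getLast? ≠ some '/' then ('/' :: t0) ++ ['/'] else ('/' :: t0)) = r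
  have hrsh : ∃ t, r = '/' :: t := by
    rw [← hr]; split
    · exact ⟨t0 ++ ['/'], by simp⟩
    · exact ⟨t0, rfl⟩
  obtain ⟨t, rfl⟩ := hrsh
  exact congrArg String.mk (pvMainList t)
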